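-- pv_equiv track=rewrite | github.com/RodrigoG13/Algebra-Lineal | Programa Sistema de Ecuaciones/Range matrix/rango de matriz.py | calcula_range
-- ===== SOURCE A (Python) =====
-- def calcula_range(matrix):
--     cuenta_ceros = 0
--     filas_cero = 0
--     for fila in range(0, len(matrix)):
--         for elemento in range(0, len(matrix[fila])):
--             if matrix[fila][elemento] == 0:
--                 cuenta_ceros = cuenta_ceros + 1
--         if cuenta_ceros == len(matrix[fila]):
--             filas_cero = filas_cero + 1
--         cuenta_ceros = 0
--     range_matrix = len(matrix) - filas_cero
--     return range_matrix
-- ===== SOURCE B (Python) =====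
-- def calcula_range(matrix):
--     return sum(1 for fila in matrix if any(x != 0 for x in fila))
-- ===== Notes on version B (the rewrite author's own statement) =====
-- stated objective: simpler
-- what changed: Replaces the per-row zero counter and its count-then-threshold comparison by a short-circuiting existence test (any nonzero element) per row, summing the rank rows directly instead of subtracting zero rows from the row count.
import Mathlib
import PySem

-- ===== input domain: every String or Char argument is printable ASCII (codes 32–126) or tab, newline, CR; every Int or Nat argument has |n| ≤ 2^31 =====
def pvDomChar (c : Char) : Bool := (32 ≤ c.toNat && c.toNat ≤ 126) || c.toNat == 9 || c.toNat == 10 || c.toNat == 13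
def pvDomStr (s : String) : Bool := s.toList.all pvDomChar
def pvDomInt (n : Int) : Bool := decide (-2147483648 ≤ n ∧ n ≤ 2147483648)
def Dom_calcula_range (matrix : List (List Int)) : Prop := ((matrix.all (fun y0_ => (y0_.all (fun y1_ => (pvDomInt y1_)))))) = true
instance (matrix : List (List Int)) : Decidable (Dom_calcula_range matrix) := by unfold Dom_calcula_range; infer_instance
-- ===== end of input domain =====

-- B replaces A's per-row zero counter and count-then-threshold step by a direct
-- count of rows containing a nonzero element (simpler decomposition, same cost).


-- ===== PORT A =====
-- loop over rows; per row, count zeros with an accumulator, then compare to the row length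
def calcula_range (matrix : List (List Int)) : Int :=
  let filas_cero : Int :=
    matrix.foldl (fun filas_cero fila =>
      let cuenta_ceros : Int :=
        fila.foldl (fun cuenta_ceros elemento =>
          if elemento = 0 then cuenta_ceros + 1 else cuenta_ceros) 0
      if cuenta_ceros = (fila.length : Int) then filas_cero + 1 else filas_cero) 0
  (matrix.length : Int) - filas_cero

-- ===== PORT B =====
-- sum(1 for fila in matrix if any(x != 0 for x in fila))
def calcula_range_alt (matrix : List (List Int)) : Int :=
  ((matrix.countP (fun fila => fila.any (fun x => decide (x ≠ 0)))) : Int)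

-- ===== PRECONDITION & SPEC =====
def Spec_calcula_range (matrix : List (List Int)) (out : Int) : Prop := out = calcula_range_alt matrix
instance (matrix : List (List Int)) (out : Int) : Decidable (Spec_calcula_range matrix out) := by unfold Spec_calcula_range; infer_instance

-- ===== CLAIM (what is proved, stated in full; the proofs are below) =====
def Claim_equal_calcula_range : Prop := ∀ (matrix : List (List Int)), Dom_calcula_range matrix → Spec_calcula_range matrix (calcula_range matrix)

-- ===== LEMMAS AND PROOFS =====
theorem pv_row_foldl (l : List Int) (c : Int) :
    l.foldl (fun cuenta e => if e = 0 then cuenta + 1 else cuenta) c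
      = c + ((l.countP (fun e => e == 0)) : Int) := by
  induction l generalizing c with
  | nil => simp
  | cons x xs ih =>
    by_cases hx : x = 0 <;> simp [ih, hx] <;> ring

theorem pv_row_iff (l : List Int) :
    (((l.countP (fun e => e == 0)) : Int) = (l.length : Int))
      ↔ (l.any (fun x => decide (x ≠ 0)) = false) := by
  rw [show (((l.countP (fun e => e == 0)) : Int) = (l.length : Int)) ↔
        l.countP (fun e => e == 0) = l.length from by exact_mod_cast Iff.rfl]
  rw [List.countP_eq_length]
  simp

theorem pv_main_fold (matrix : List (List Int)) (a : Int) :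
    matrix.foldl (fun fz fila =>
      if (fila.foldl (fun c e => if e = 0 then c + 1 else c) 0 : Int) = (fila.length : Int)
      then fz + 1 else fz) a
    = a + (matrix.length : Int)
        - ((matrix.countP (fun fila => fila.any (fun x => decide (x ≠ 0)))) : Int) := by
  induction matrix generalizing a with
  | nil => simp
  | cons r rs ih =>
    have hr := pv_row_foldl r 0
    by_cases h : r.any (fun x => decide (x ≠ 0)) = false
    · have : (r.foldl (fun c e => if e = 0 then c + 1 else c) 0 : Int) = (r.length : Int) := by
        rw [hr]; simpa using (pv_row_iff r).mpr h
      simp only [List.foldl_cons, this, List.countP_cons, List.length_cons, h]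
      rw [ih]; push_cast; ring
    · have hne : ¬ (r.foldl (fun c e => if e = 0 then c + 1 else c) 0 : Int) = (r.length : Int) := by
        rw [hr]; intro hc
        exact h ((pv_row_iff r).mp (by simpa using hc))
      have hb : (r.any (fun x => decide (x ≠ 0))) = true := by
        cases hab : r.any (fun x => decide (x ≠ 0))
        · exact absurd hab h
        · rfl
      simp only [List.foldl_cons, if_neg hne, List.countP_cons, List.length_cons, hb]
      rw [ih]; push_cast; ring

-- ===== VERDICT (by name: the statement is the Claim_ definition above) =====
theorem calcula_range_spec : Claim_equal_calcula_range := by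
  intro matrix _
  unfold Spec_calcula_range calcula_range calcula_range_alt
  simp only [pv_main_fold]
  have := List.countP_le_length (l := matrix) (p := fun fila => fila.any (fun x => decide (x ≠ 0)))
  omega
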